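-- pv_equiv track=rewrite | github.com/luansvb/guardinia | src/lambda_handler.py | menciona_entidade_sensivel
-- ===== SOURCE A (Python) =====
-- def menciona_entidade_sensivel(texto: str) -> bool:
--     """
--     Detects references to sensitive or high-value entities
--     commonly impersonated in phishing attempts.
--     """
--
--     entidades = [
--         "banco", "caixa", "itau", "itaú", "bradesco", "santander",
--         "nubank", "receita", "gov", "whatsapp", "email",
--         "google", "apple", "microsoft", "inter", "c6"
--     ]
--
--     t = texto.lower()
--     return any(e in t for e in entidades)
-- ===== SOURCE B (Python) =====
-- _ENTIDADES = [
--     "banco", "caixa", "itau", "itaú", "bradesco", "santander",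
--     "nubank", "receita", "gov", "whatsapp", "email",
--     "google", "apple", "microsoft", "inter", "c6"
-- ]
--
--
-- def menciona_entidade_sensivel(texto: str) -> bool:
--     """Single left-to-right scan: at each position check whether any
--     keyword starts there, instead of one full substring search per keyword."""
--     t = texto.lower()
--     for i in range(len(t)):
--         for e in _ENTIDADES:
--             if t.startswith(e, i):
--                 return True
--     return False
-- ===== Notes on version B (the rewrite author's own statement) =====
-- stated objective: alternative
-- what changed: A runs 16 independent full substring searches, one per keyword; B lowercases once and makes a single left-to-right scan over the text, testing at each position whether any keyword starts there.
import Mathlib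
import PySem

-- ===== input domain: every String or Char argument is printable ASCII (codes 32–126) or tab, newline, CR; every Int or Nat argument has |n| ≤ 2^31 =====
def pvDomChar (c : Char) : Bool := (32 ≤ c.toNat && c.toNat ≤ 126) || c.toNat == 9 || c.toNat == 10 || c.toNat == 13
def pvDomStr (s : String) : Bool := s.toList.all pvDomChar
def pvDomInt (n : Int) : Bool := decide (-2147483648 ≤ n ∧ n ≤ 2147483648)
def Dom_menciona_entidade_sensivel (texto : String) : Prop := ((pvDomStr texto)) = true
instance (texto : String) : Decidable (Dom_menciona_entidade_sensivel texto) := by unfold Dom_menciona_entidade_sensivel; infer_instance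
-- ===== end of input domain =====

-- B replaces A's 16 independent substring searches by one left-to-right scan
-- testing each position against every keyword (objective: alternative).

-- ===== PORT A =====
def pvEntidades : List String :=
  ["banco", "caixa", "itau", "itaú", "bradesco", "santander",
   "nubank", "receita", "gov", "whatsapp", "email",
   "google", "apple", "microsoft", "inter", "c6"]

def menciona_entidade_sensivel (texto : String) : Bool :=
  let t := PySem.Str.lower texto
  pvEntidades.any (fun e => PySem.Str.isIn e t)

-- ===== PORT B =====
-- keyword list of Source B, as lists of characters (the scan works position by position)
def pvEntidadesB : List (List Char) := pvEntidades.map String.toList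

-- 'for i in range(len(t)): for e in _ENTIDADES: if t.startswith(e, i): return True'
-- as structural recursion over the suffixes of t (suffix starting at i).
def pvScan (l : List Char) : Bool :=
  match l with
  | [] => false
  | _ :: rest =>
    if pvEntidadesB.any (fun e => e.isPrefixOf l) then true else pvScan rest

def menciona_entidade_sensivel_alt (texto : String) : Bool :=
  pvScan (PySem.Chars.lower texto.toList)

-- ===== PRECONDITION & SPEC =====
def Spec_menciona_entidade_sensivel (texto : String) (out : Bool) : Prop := out = menciona_entidade_sensivel_alt texto
instance (texto : String) (out : Bool) : Decidable (Spec_menciona_entidade_sensivel texto out) := by unfold Spec_menciona_entidade_sensivel; infer_instance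

-- ===== CLAIM (what is proved, stated in full; the proofs are below) =====
def Claim_equal_menciona_entidade_sensivel : Prop := ∀ (texto : String), Dom_menciona_entidade_sensivel texto → Spec_menciona_entidade_sensivel texto (menciona_entidade_sensivel texto)

-- ===== LEMMAS AND PROOFS =====

-- every keyword is nonempty (so a keyword is never a prefix of the empty suffix)
theorem pvEntidadesB_ne_nil : ∀ e ∈ pvEntidadesB, e ≠ [] := by decide

theorem pvScan_cons (c : Char) (rest : List Char) :
    pvScan (c :: rest) =
      if pvEntidadesB.any (fun e => e.isPrefixOf (c :: rest)) then true else pvScan rest := rfl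

-- the scan finds exactly the inputs where some keyword is a prefix of some suffix
theorem pvScan_iff (l : List Char) :
    pvScan l = true ↔ ∃ e ∈ pvEntidadesB, ∃ j, e <+: l.drop j := by
  induction l with
  | nil =>
    simp only [pvScan, List.drop_nil, Bool.false_eq_true, false_iff]
    rintro ⟨e, he, _, hp⟩
    exact pvEntidadesB_ne_nil e he (List.prefix_nil.mp hp)
  | cons c rest ih =>
    rw [pvScan_cons]
    by_cases h : pvEntidadesB.any (fun e => e.isPrefixOf (c :: rest)) = true
    · simp only [h, if_true, true_iff]
      obtain ⟨e, he, hp⟩ := List.any_eq_true.mp h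
      exact ⟨e, he, 0, List.isPrefixOf_iff_prefix.mp hp⟩
    · rw [if_neg h, ih]
      constructor
      · rintro ⟨e, he, j, hp⟩
        exact ⟨e, he, j + 1, by simpa using hp⟩
      · rintro ⟨e, he, j, hp⟩
        cases j with
        | zero =>
          have hpre : e.isPrefixOf (c :: rest) = true := by
            rw [List.isPrefixOf_iff_prefix]; simpa using hp
          exact absurd (List.any_eq_true.mpr ⟨e, he, hpre⟩) h
        | succ j => exact ⟨e, he, j, by simpa using hp⟩

-- ===== VERDICT (by name: the statement is the Claim_ definition above) =====
theorem menciona_entidade_sensivel_spec : Claim_equal_menciona_entidade_sensivel := by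
  intro texto _
  unfold Spec_menciona_entidade_sensivel menciona_entidade_sensivel menciona_entidade_sensivel_alt
  rw [Bool.eq_iff_iff, pvScan_iff]
  simp only [List.any_eq_true, pvEntidadesB, List.mem_map]
  constructor
  · rintro ⟨e, he, hin⟩
    refine ⟨e.toList, ⟨e, he, rfl⟩, ?_⟩
    rw [PySem.Chars.exists_prefix_drop_iff_isIn]
    simpa [PySem.Str.lower] using hin
  · rintro ⟨_, ⟨e, he, rfl⟩, hj⟩
    refine ⟨e, he, ?_⟩
    rw [PySem.Chars.exists_prefix_drop_iff_isIn] at hj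
    simpa [PySem.Str.lower] using hj
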